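-- pv_equiv track=rewrite | github.com/pypi-data/pypi-mirror-193 | packages/tonkin/tonkin-0.0.1-py3-none-any.whl/tonkin/arrays.py | splitArrayBySub
-- ===== SOURCE A (Python) =====
-- def shiftArrayLeft(array, shift):
-- 	# Bring large numbers down to smaller equivalents
-- 	# and handle negatives for shifts right
-- 	shift = shift % len(array)
--
-- 	for i in range(0, shift):
-- 		array.append(array.pop(0))
-- 	return array
--
-- def getSubArrayIndices(source, target):
-- 	output = []
--
-- 	# TODO: Ensure that the buffer items don't appear in split
-- 	buffer = [None] * len(target)
--
-- 	for j, i in enumerate(source):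
-- 		buffer = shiftArrayLeft(buffer, 1)
-- 		buffer[-1] = i
--
-- 		if buffer == target:
-- 			output.append(j)
--
-- 	return output
--
-- def splitArrayBySub(source, target):
-- 	output = []
-- 	indices = getSubArrayIndices(source, target)
--
-- 	# The case where the target does not appear
-- 	if indices == []:
-- 		return [source]
--
-- 	for j, i in enumerate(indices):
-- 		startOfBlock = i - len(target) + 1
--
-- 		if j < len(indices) - 1:
-- 			endOfBlock = indices[j+1] - len(target) + 1
-- 		else:
-- 			endOfBlock = len(source)
--
-- 		output.append(source[startOfBlock:endOfBlock])
--
-- 	return output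
-- ===== SOURCE B (Python) =====
-- def splitArrayBySub(source, target):
-- 	# One pass over start positions: open a new block at every occurrence of
-- 	# target (closing the previous one), appending elements to the open block.
-- 	m = len(target)
-- 	blocks = []
-- 	cur = None
-- 	for i in range(len(source)):
-- 		if m > 0 and source[i:i + m] == target:
-- 			if cur is not None:
-- 				blocks.append(cur)
-- 			cur = []
-- 		if cur is not None:
-- 			cur.append(source[i])
-- 	if cur is None:
-- 		return [source]
-- 	blocks.append(cur)
-- 	return blocks
-- ===== Notes on version B (the rewrite author's own statement) =====
-- stated objective: simpler
-- what changed: B replaces A's two-phase scheme (rotating a None-padded buffer to collect match end-indices, then re-slicing the source around them) with a single left-to-right pass over start positions that builds the output blocks directly, opening a new block at each occurrence.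
import Mathlib
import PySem

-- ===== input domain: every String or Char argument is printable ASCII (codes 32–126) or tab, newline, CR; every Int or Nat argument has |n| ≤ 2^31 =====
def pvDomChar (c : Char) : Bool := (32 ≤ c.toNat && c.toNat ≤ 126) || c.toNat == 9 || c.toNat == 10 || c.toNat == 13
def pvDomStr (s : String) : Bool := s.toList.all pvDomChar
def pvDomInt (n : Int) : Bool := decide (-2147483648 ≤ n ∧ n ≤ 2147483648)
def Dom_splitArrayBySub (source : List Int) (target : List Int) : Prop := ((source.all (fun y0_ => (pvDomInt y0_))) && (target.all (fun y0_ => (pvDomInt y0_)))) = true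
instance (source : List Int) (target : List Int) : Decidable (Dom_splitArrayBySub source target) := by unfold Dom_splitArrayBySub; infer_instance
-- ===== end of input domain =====

-- B replaces A's two-phase scheme (rotating None-buffer match detection, then slicing the
-- source around the collected end-indices) with a single pass over start positions that
-- builds the output blocks directly; objective: simpler.

-- ===== PORT A =====
def rotOnceA (l : List (Option Int)) : List (Option Int) :=
  match l with
  | [] => []
  | x :: xs => xs ++ [x]
def shiftArrayLeftA (array : List (Option Int)) (shift : Int) : List (Option Int) :=
  if array.length = 0 then array
  else
    let s := PySem.Int.mod shift (array.length : Int)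
    (List.range s.toNat).foldl (fun l _ => rotOnceA l) array
def stepA (tgtO : List (Option Int)) (st : List Int × List (Option Int)) (ji : Int × Int) : List Int × List (Option Int) :=
  let buffer := shiftArrayLeftA st.2 1
  let buffer := buffer.dropLast ++ [some ji.2]
  if buffer = tgtO then (st.1 ++ [ji.1], buffer) else (st.1, buffer)
def getSubArrayIndicesA (source : List Int) (target : List Int) : List Int :=
  ((PySem.List.enumerate source 0).foldl (stepA (target.map some)) ([], List.replicate target.length none)).1
def splitArrayBySub (source : List Int) (target : List Int) : List (List Int) :=
  let indices := getSubArrayIndicesA source target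
  if indices = [] then [source]
  else
    (PySem.List.enumerate indices 0).foldl (fun out ji =>
      let startOfBlock : Int := ji.2 - (target.length : Int) + 1
      let endOfBlock : Int :=
        if ji.1 < (indices.length : Int) - 1
        then PySem.List.pyGetD indices (ji.1 + 1) 0 - (target.length : Int) + 1
        else (source.length : Int)
      out ++ [PySem.List.slice source (some startOfBlock) (some endOfBlock)]) []

-- ===== PORT B =====
def stepB (source : List Int) (target : List Int) (st : List (List Int) × Option (List Int)) (i : Nat) : List (List Int) × Option (List Int) :=
  let st1 :=
    if 0 < target.length ∧ PySem.List.slice source (some (i : Int)) (some ((i : Int) + (target.length : Int))) = target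
    then (match st.2 with | none => st.1 | some c => st.1 ++ [c], some ([] : List Int))
    else st
  match st1.2 with
  | none => st1
  | some c => (st1.1, some (c ++ [source.getD i 0]))
def splitArrayBySub_alt (source : List Int) (target : List Int) : List (List Int) :=
  let st := (List.range source.length).foldl (stepB source target) ([], none)
  match st.2 with
  | none => [source]
  | some c => st.1 ++ [c]

-- ===== PRECONDITION & SPEC =====
-- Pre_ excludes exactly target = [] with source ≠ [], where A raises ZeroDivisionError
-- (shift % len(buffer) on the empty buffer).
def Pre_splitArrayBySub (source : List Int) (target : List Int) : Prop := target = [] → source = []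
instance (source : List Int) (target : List Int) : Decidable (Pre_splitArrayBySub source target) := by unfold Pre_splitArrayBySub; infer_instance
def pvWitness_splitArrayBySub : List Int × List Int := ([1, 2, 3, 2, 5], [2])

def Spec_splitArrayBySub (source : List Int) (target : List Int) (out : List (List Int)) : Prop := out = splitArrayBySub_alt source target
instance (source : List Int) (target : List Int) (out : List (List Int)) : Decidable (Spec_splitArrayBySub source target out) := by unfold Spec_splitArrayBySub; infer_instance

-- ===== CLAIM (what is proved, stated in full; the proofs are below) =====
def Claim_equal_splitArrayBySub : Prop := ∀ (source : List Int) (target : List Int), Dom_splitArrayBySub source target → Pre_splitArrayBySub source target → Spec_splitArrayBySub source target (splitArrayBySub source target)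

-- ===== LEMMAS AND PROOFS =====
def occB (source : List Int) (target : List Int) (i : Nat) : Bool :=
  decide ((source.drop i).take target.length = target)
def occE (source : List Int) (target : List Int) (j : Nat) : Bool :=
  decide (target.length ≤ j + 1 ∧ (source.drop (j + 1 - target.length)).take target.length = target)
def startsOf (source : List Int) (target : List Int) : List Nat :=
  (List.range source.length).filter (occB source target)
def bufA (source : List Int) (target : List Int) (j : Nat) : List (Option Int) :=
  (List.replicate target.length none ++ (source.take j).map some).drop j
def initPart (src : List Int) : List Nat → List (List Int)
  | [] => []
  | [_] => []
  | s :: s' :: r => (src.drop s).take (s' - s) :: initPart src (s' :: r)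
theorem length_bufA (source target : List Int) (j : Nat) (hj : j ≤ source.length) :
    (bufA source target j).length = target.length := by
  simp [bufA]; omega
theorem shift_dropLast (l : List (Option Int)) (hl : l ≠ []) (v : Option Int) :
    (shiftArrayLeftA l 1).dropLast ++ [v] = l.tail ++ [v] := by
  match l with
  | [x] =>
    have h1 : PySem.Int.mod 1 ((1:Nat):Int) = 0 := by decide
    simp [shiftArrayLeftA, h1]
  | x :: y :: xs =>
    have hpos : (0:Int) < ((x :: y :: xs).length : Int) := by exact_mod_cast Nat.succ_pos _
    have h1 : PySem.Int.mod 1 (((x :: y :: xs).length : Nat) : Int) = 1 := by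
      rw [PySem.Int.mod_eq_emod_of_pos hpos]
      exact Int.emod_eq_of_lt (by omega) (by simp)
    simp only [shiftArrayLeftA, h1]
    norm_num
    simp only [rotOnceA]
    rw [List.dropLast_concat]
    simp
theorem bufA_succ (source target : List Int) (j : Nat) (hj : j < source.length)
    (ht : target ≠ []) :
    (bufA source target j).tail ++ [some source[j]] = bufA source target (j + 1) := by
  have hm : 0 < target.length := List.length_pos_of_ne_nil ht
  unfold bufA
  rw [List.take_add_one, List.getElem?_eq_getElem hj]
  simp only [Option.toList_some, List.map_append, List.map_cons, List.map_nil,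
    ← List.append_assoc]
  rw [List.tail_drop,
    List.drop_append_of_le_length
      (l₁ := List.replicate target.length none ++ (source.take j).map some)
      (l₂ := [some source[j]]) (by simp; omega)]
theorem bufA_eq_tgt (source target : List Int) (j : Nat) (hj : j < source.length)
    (ht : target ≠ []) :
    (bufA source target (j + 1) = target.map some) ↔ (occE source target j = true) := by
  have hm : 0 < target.length := List.length_pos_of_ne_nil ht
  simp only [occE, decide_eq_true_iff]
  by_cases hc : target.length ≤ j + 1
  · have hb : bufA source target (j + 1)
        = ((source.drop (j + 1 - target.length)).take target.length).map some := by
      unfold bufA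
      rw [List.drop_append, List.drop_replicate]
      simp only [List.length_replicate, show target.length - (j+1) = 0 by omega,
        List.replicate_zero, List.nil_append]
      rw [← List.map_drop, List.drop_take]
      congr 2
      omega
    rw [hb, List.map_inj_right (fun a b h => Option.some.inj h)]
    exact ⟨fun h => ⟨hc, h⟩, fun h => h.2⟩
  · constructor
    · intro h
      exfalso
      have h0 := congrArg (fun l => l[0]?) h
      simp only at h0
      rw [show bufA source target (j+1) = (List.replicate target.length (none : Option Int) ++ (source.take (j+1)).map some).drop (j+1) from rfl] at h0
      rw [List.getElem?_drop, List.getElem?_append_left (by simp; omega),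
        List.getElem?_replicate] at h0
      simp only [if_pos (by omega : j + 1 + 0 < target.length)] at h0
      cases target with
      | nil => exact ht rfl
      | cons a t => simp at h0
    · intro h; omega
theorem stepA_eq (source target : List Int) (ht : target ≠ []) (j : Nat) (hj : j < source.length)
    (acc : List Int) :
    stepA (target.map some) (acc, bufA source target j) ((j : Int), source[j]) =
      ((if occE source target j then acc ++ [(j : Int)] else acc), bufA source target (j + 1)) := by
  have hm : 0 < target.length := List.length_pos_of_ne_nil ht
  have hlen := length_bufA source target j (le_of_lt hj)
  have hne : bufA source target j ≠ [] := by
    intro h; rw [h] at hlen; simp at hlen; omega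
  unfold stepA
  simp only
  rw [shift_dropLast _ hne, bufA_succ source target j hj ht]
  by_cases hocc : occE source target j = true
  · rw [if_pos ((bufA_eq_tgt source target j hj ht).mpr hocc), if_pos hocc]
  · rw [if_neg (fun h => hocc ((bufA_eq_tgt source target j hj ht).mp h)),
      if_neg (by simpa using hocc)]
theorem phase1 (source target : List Int) (ht : target ≠ []) :
    ∀ j, j ≤ source.length → ∀ acc : List Int,
    ((PySem.List.enumerate (source.drop j) (j : Int)).foldl (stepA (target.map some))
        (acc, bufA source target j)).1
      = acc ++ ((List.range' j (source.length - j)).filter (occE source target)).map (fun (s : Nat) => (s : Int)) := by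
  intro j hj acc
  induction hfuel : source.length - j generalizing j acc with
  | zero =>
    have hjn : j = source.length := by omega
    subst hjn
    simp
  | succ k ih =>
    have hjlt : j < source.length := by omega
    rw [List.drop_eq_getElem_cons hjlt, PySem.List.enumerate_cons, List.foldl_cons,
      stepA_eq source target ht j hjlt acc]
    rw [show (j : Int) + 1 = ((j + 1 : Nat) : Int) by push_cast; ring]
    rw [ih (j + 1) (by omega) _ (by omega)]
    rw [List.range'_succ]
    simp only [List.filter_cons]
    by_cases hocc : occE source target j = true
    · simp [hocc, List.append_assoc]
    · simp [hocc]
theorem indices_eq (source target : List Int) (ht : target ≠ []) :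
    getSubArrayIndicesA source target
      = ((List.range source.length).filter (occE source target)).map (fun (s : Nat) => (s : Int)) := by
  have h0 := phase1 source target ht 0 (Nat.zero_le _) []
  simp only [List.drop_zero, Nat.sub_zero, Nat.cast_zero, List.nil_append] at h0
  rw [List.range_eq_range']
  rw [← h0]
  unfold getSubArrayIndicesA
  congr 1
  unfold bufA
  simp
theorem occB_le (source target : List Int) (i : Nat) (ht : target ≠ [])
    (h : occB source target i = true) : i + target.length ≤ source.length := by
  unfold occB at h
  rw [decide_eq_true_iff] at h
  have := congrArg List.length h
  simp only [List.length_take, List.length_drop] at this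
  have htl : 0 < target.length := List.length_pos_of_ne_nil ht
  omega
theorem ends_eq_starts (source target : List Int) (ht : target ≠ []) :
    (List.range source.length).filter (occE source target)
      = (startsOf source target).map (· + (target.length - 1)) := by
  have hm : 0 < target.length := List.length_pos_of_ne_nil ht
  refine List.Perm.eq_of_pairwise (le := (· < ·))
    (fun a b _ _ h1 h2 => absurd h2 (not_lt.mpr h1.le)) ?_ ?_ ?_
  · exact List.Pairwise.filter _ List.pairwise_lt_range
  · exact ((List.Pairwise.filter _ List.pairwise_lt_range).map _ (fun a b h => by omega))
  · apply List.perm_of_nodup_nodup_toFinset_eq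
    · exact (List.Pairwise.filter _ List.pairwise_lt_range).imp (fun h => Nat.ne_of_lt h)
    · exact ((List.Pairwise.filter _ List.pairwise_lt_range).map _
        (fun a b (h : a < b) => by omega : ∀ a b, a < b → a + (target.length-1) < b + (target.length-1))).imp
        (fun h => Nat.ne_of_lt h)
    · apply Finset.ext
      intro x
      simp only [List.mem_toFinset, List.mem_filter, List.mem_range, List.mem_map, startsOf]
      constructor
      · intro ⟨hx, hocc⟩
        unfold occE at hocc
        rw [decide_eq_true_iff] at hocc
        refine ⟨x + 1 - target.length, ⟨⟨by omega, ?_⟩, by omega⟩⟩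
        unfold occB
        rw [decide_eq_true_iff]
        exact hocc.2
      · intro ⟨s, ⟨hslt, hocc⟩, hsx⟩
        have hle := occB_le source target s ht hocc
        constructor
        · omega
        · unfold occE
          rw [decide_eq_true_iff]
          refine ⟨by omega, ?_⟩
          rw [show x + 1 - target.length = s by omega]
          unfold occB at hocc
          exact decide_eq_true_iff.mp hocc
theorem initPart_concat (src : List Int) (ss : List Nat) (s k : Nat)
    (h : ss.getLast? = some s) :
    initPart src (ss ++ [k]) = initPart src ss ++ [(src.drop s).take (k - s)] := by
  induction ss with
  | nil => simp at h
  | cons a r ih =>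
    cases r with
    | nil => simp at h; subst h; simp [initPart]
    | cons b r' =>
      rw [List.getLast?_cons_cons] at h
      have := ih h
      simp only [List.cons_append, initPart] at this ⊢
      rw [this]
theorem stepB_cond (source target : List Int) (ht : target ≠ []) (i : Nat) :
    (0 < target.length ∧ PySem.List.slice source (some (i : Int)) (some ((i : Int) + (target.length : Int))) = target)
      ↔ occB source target i = true := by
  rw [PySem.List.slice_natCast_add]
  unfold occB
  rw [decide_eq_true_iff]
  exact ⟨fun h => h.2, fun h => ⟨List.length_pos_of_ne_nil ht, h⟩⟩
theorem phaseB (source target : List Int) (ht : target ≠ []) :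
    ∀ k, k ≤ source.length →
    (List.range k).foldl (stepB source target) ([], none)
      = (initPart source ((List.range k).filter (occB source target)),
         ((List.range k).filter (occB source target)).getLast?.map
           (fun s => (source.drop s).take (k - s))) := by
  intro k hk
  induction k with
  | zero => simp [initPart]
  | succ k ih =>
    have hklt : k < source.length := by omega
    have hgetD : source.getD k 0 = source[k] := List.getD_eq_getElem _ _ hklt
    have hgetD2 : source[k]?.getD 0 = source[k] := by
      rw [List.getElem?_eq_getElem hklt]; rfl
    have htake1 : (source.drop k).take 1 = [source[k]] := by
      rw [List.drop_eq_getElem_cons hklt]; rfl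
    rw [List.range_succ, List.foldl_append, ih (by omega), List.foldl_cons, List.foldl_nil,
      List.filter_append, List.filter_cons, List.filter_nil]
    cases hlast : ((List.range k).filter (occB source target)).getLast? with
    | none =>
      have hnil : (List.range k).filter (occB source target) = [] :=
        List.getLast?_eq_none_iff.mp hlast
      rw [hnil]
      by_cases hocc : occB source target k = true
      · rw [if_pos hocc]
        unfold stepB
        rw [if_pos ((stepB_cond source target ht k).mpr hocc)]
        simp [initPart, hgetD, hgetD2, htake1]
      · rw [if_neg hocc]
        unfold stepB
        rw [if_neg (fun h => hocc ((stepB_cond source target ht k).mp h))]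
        simp [initPart]
    | some s =>
      have hmem := List.mem_of_getLast? hlast
      have hsk : s < k := List.mem_range.mp (List.mem_filter.mp hmem).1
      have hpend : (source.drop s).take (k - s) ++ [source[k]] = (source.drop s).take (k + 1 - s) := by
        rw [show k + 1 - s = (k - s) + 1 by omega, List.take_add_one, List.getElem?_drop,
          show s + (k - s) = k by omega, List.getElem?_eq_getElem hklt]
        simp
      by_cases hocc : occB source target k = true
      · rw [if_pos hocc]
        unfold stepB
        rw [if_pos ((stepB_cond source target ht k).mpr hocc)]
        rw [initPart_concat source _ s k hlast, List.getLast?_concat]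
        simp [hlast, hgetD, hgetD2, htake1]
      · rw [if_neg hocc]
        unfold stepB
        rw [if_neg (fun h => hocc ((stepB_cond source target ht k).mp h))]
        simp only [hlast, Option.map_some, List.append_nil]
        simp [hgetD, hgetD2, hpend]
theorem length_initPart (src : List Int) (ss : List Nat) :
    (initPart src ss).length = ss.length - 1 := by
  induction ss with
  | nil => simp [initPart]
  | cons s r ih =>
    cases r with
    | nil => simp [initPart]
    | cons s' r' => simp [initPart] at ih ⊢; omega
theorem getElem_initPart (src : List Int) (ss : List Nat) (k : Nat)
    (hk : k + 1 < ss.length) (h1 : k < (initPart src ss).length)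
    (h2 : k < ss.length) :
    (initPart src ss)[k] = (src.drop ss[k]).take (ss[k + 1]'hk - ss[k]) := by
  induction ss generalizing k with
  | nil => simp at hk
  | cons a r ih =>
    cases r with
    | nil => simp at hk
    | cons b r' =>
      cases k with
      | zero => simp [initPart]
      | succ k' =>
        simp only [initPart] at h1 ⊢
        simp only [List.getElem_cons_succ]
        exact ih k' (by simpa using hk) (by simpa using h1) (by simpa using h2)
theorem main_eq (source target : List Int) (ht : target ≠ []) :
    splitArrayBySub source target = splitArrayBySub_alt source target := by
  have hm : 0 < target.length := List.length_pos_of_ne_nil ht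
  have hind : getSubArrayIndicesA source target
      = (startsOf source target).map (fun s => ((s + (target.length - 1) : Nat) : Int)) := by
    rw [indices_eq source target ht, ends_eq_starts source target ht]
    induction startsOf source target with
    | nil => rfl
    | cons a l ih => simp only [List.map_cons] at ih ⊢; rw [ih]
  have hfold := phaseB source target ht source.length le_rfl
  unfold splitArrayBySub splitArrayBySub_alt
  rw [hind, hfold]
  cases hcase : (startsOf source target).getLast? with
  | none =>
    have hnil : startsOf source target = [] := List.getLast?_eq_none_iff.mp hcase
    rw [show (List.range source.length).filter (occB source target) = startsOf source target from rfl, hnil]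
    simp [initPart]
  | some sl =>
    have hne : startsOf source target ≠ [] := by
      intro h; rw [h] at hcase; simp at hcase
    have hL : 0 < (startsOf source target).length := List.length_pos_of_ne_nil hne
    rw [show (List.range source.length).filter (occB source target) = startsOf source target from rfl, hcase]
    rw [if_neg (by simp [hne])]
    simp only [Option.map_some]
    rw [PySem.List.foldl_append_singleton_eq_map]
    rw [List.nil_append]
    apply List.ext_getElem
    · simp [PySem.List.length_enumerate, length_initPart, List.length_map, List.length_append]
      omega
    · intro k hk1 hk2
      have hkL : k < (startsOf source target).length := by
        simpa [PySem.List.length_enumerate, List.length_map] using hk1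
      rw [List.getElem_map, PySem.List.getElem_enumerate _ _ k (by simpa [PySem.List.length_enumerate, List.length_map] using hkL)]
      simp only [List.getElem_map]
      have hsl : sl = (startsOf source target)[(startsOf source target).length - 1]'(by omega) := by
        have := List.getLast?_eq_getElem? (l := (startsOf source target))
        rw [hcase, List.getElem?_eq_getElem (by omega)] at this
        exact Option.some.inj this
      have hstart : (((((startsOf source target)[k] + (target.length - 1) : Nat)) : Int) - (target.length : Int) + 1) = (((startsOf source target)[k] : Nat) : Int) := by
        omega
      rw [hstart]
      by_cases hkmid : k < (startsOf source target).length - 1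
      · rw [if_pos (by simp only [List.length_map, PySem.List.length_enumerate]; omega)]
        have hk1' : k + 1 < (startsOf source target).length := by omega
        have hcast : (0 : Int) + (k : Int) + 1 = ((k + 1 : Nat) : Int) := by push_cast; ring
        rw [hcast, PySem.List.pyGetD_natCast, List.getD_eq_getElem _ _ (by simp only [List.length_map]; omega), List.getElem_map]
        have hend : (((((startsOf source target)[k + 1]'hk1' + (target.length - 1) : Nat)) : Int) - (target.length : Int) + 1) = (((startsOf source target)[k + 1]'hk1' : Nat) : Int) := by
          omega
        rw [hend, PySem.List.slice_natCast]
        rw [List.getElem_append_left (by rw [length_initPart]; omega)]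
        rw [getElem_initPart source (startsOf source target) k hk1' (by rw [length_initPart]; omega) (by omega)]
      · rw [if_neg (by simp only [List.length_map, PySem.List.length_enumerate]; omega)]
        rw [PySem.List.slice_natCast]
        rw [List.getElem_concat_length (by rw [length_initPart]; omega)]
        have hkeq : k = (startsOf source target).length - 1 := by omega
        simp only [hkeq]
        rw [← hsl]

-- ===== VERDICT (by name: the statement is the Claim_ definition above) =====
theorem splitArrayBySub_spec : Claim_equal_splitArrayBySub := by
  intro source target _ hpre
  unfold Spec_splitArrayBySub
  by_cases ht : target = []
  · subst ht
    have hs := hpre rfl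
    subst hs
    rfl
  · exact main_eq source target ht
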